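-- pv_equiv track=rewrite | github.com/MuNeNICK/os-iso-catalog | scripts/check_new_releases.py | get_catalog_versions
-- ===== SOURCE A (Python) =====
-- def get_catalog_versions(images, distro, match_depth):
--     """Get set of normalized versions in our catalog for a distro."""
--     versions = set()
--     for img in images:
--         if img.get("distro") != distro:
--             continue
--         v = str(img["version"])
--         versions.add(v)  # Exact match
--         parts = v.split(".")
--         # Add all truncations down to match_depth
--         for depth in range(1, len(parts) + 1):
--             versions.add(".".join(parts[:depth]))
--     return versions
-- ===== SOURCE B (Python) =====
-- def get_catalog_versions(images, distro, match_depth):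
--     """Get set of normalized versions in our catalog for a distro.
--
--     Re-implementation: one incremental pass over the version's parts keeps a
--     running prefix, instead of re-slicing and re-joining parts[:depth] for
--     every depth; images without a "version" field are skipped instead of
--     raising KeyError."""
--     versions = set()
--     for img in images:
--         if img.get("distro") == distro:
--             v = img.get("version")
--             if v is None:
--                 continue
--             v = str(v)
--             versions.add(v)  # Exact match
--             parts = v.split(".")
--             prefix = parts[0]
--             versions.add(prefix)
--             for part in parts[1:]:
--                 prefix = prefix + "." + part
--                 versions.add(prefix)
--     return versions
-- ===== Notes on version B (the rewrite author's own statement) =====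
-- stated objective: alternative
-- what changed: The inner loop that re-sliced parts[:depth] and re-joined with '.' for every depth (O(L^2) work per version string of L parts) is replaced by a single incremental pass that extends a running prefix string and adds it at each step (O(L) joins).
import Mathlib
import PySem

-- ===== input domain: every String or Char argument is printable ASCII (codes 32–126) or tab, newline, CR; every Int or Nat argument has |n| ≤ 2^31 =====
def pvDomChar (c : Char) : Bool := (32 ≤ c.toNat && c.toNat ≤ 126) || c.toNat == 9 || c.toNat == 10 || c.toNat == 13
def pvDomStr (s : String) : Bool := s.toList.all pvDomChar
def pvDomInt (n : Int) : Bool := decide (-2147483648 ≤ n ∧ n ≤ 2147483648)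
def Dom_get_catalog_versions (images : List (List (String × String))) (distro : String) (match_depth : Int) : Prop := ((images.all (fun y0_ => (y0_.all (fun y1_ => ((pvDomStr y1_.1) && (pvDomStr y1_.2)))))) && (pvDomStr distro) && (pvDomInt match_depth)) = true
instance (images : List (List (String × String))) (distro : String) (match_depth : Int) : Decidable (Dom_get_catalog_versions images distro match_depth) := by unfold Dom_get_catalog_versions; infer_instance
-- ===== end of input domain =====

-- B replaces A's per-depth slice-and-join of the version parts by a single incremental
-- pass that extends a running prefix (alternative decomposition, same result set).

-- ===== PORT A =====
def get_catalog_versions (images : List (List (String × String))) (distro : String) (match_depth : Int) : List String :=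
  images.foldl
    (fun versions img =>
      if (PySem.Dict.mk img).get? "distro" ≠ some distro then versions
      else
        -- v = str(img["version"]); KeyError excluded by Pre_
        let v := ((PySem.Dict.mk img).get? "version").getD ""
        let versions := PySem.Set.add versions v   -- Exact match
        let parts := (PySem.Str.split? v ".").getD []
        -- for depth in range(1, len(parts) + 1): versions.add(".".join(parts[:depth]))
        (PySem.List.pyRange 1 ((parts.length : Int) + 1)).foldl
          (fun versions depth =>
            PySem.Set.add versions (PySem.Str.join "." (PySem.List.slice parts none (some depth))))
          versions)
    PySem.Set.empty

-- ===== PORT B =====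
def get_catalog_versions_alt (images : List (List (String × String))) (distro : String) (match_depth : Int) : List String :=
  images.foldl
    (fun versions img =>
      if (PySem.Dict.mk img).get? "distro" = some distro then
        -- v = img.get("version"); images without it are skipped (A raises KeyError there: outside Pre_)
        match (PySem.Dict.mk img).get? "version" with
        | none => versions
        | some v =>
          let versions := PySem.Set.add versions v
          -- prefix = parts[0]; then extend incrementally (split never returns []; the [] arm is unreachable)
          match (PySem.Str.split? v ".").getD [] with
          | [] => versions
          | p :: rest =>
            (rest.foldl
              (fun st part => (st.1 ++ "." ++ part, PySem.Set.add st.2 (st.1 ++ "." ++ part)))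
              (p, PySem.Set.add versions p)).2
      else versions)
    PySem.Set.empty

-- ===== PRECONDITION & SPEC =====
-- A raises KeyError when an image matching the distro has no "version" key: those inputs are excluded
-- (B skips such images instead of raising). Pre_ also requires the "distro"/"version" keys to occur at
-- most once per association list: a list with a duplicated key does not represent any Python dict, so A's
-- behaviour on it is undefined (no Python input is excluded by this conjunct).
def Pre_get_catalog_versions (images : List (List (String × String))) (distro : String) (match_depth : Int) : Prop :=
  ∀ img ∈ images,
    (img.map Prod.fst).count "distro" ≤ 1 ∧ (img.map Prod.fst).count "version" ≤ 1 ∧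
    ((PySem.Dict.mk img).get? "distro" = some distro → ((PySem.Dict.mk img).get? "version").isSome = true)
instance (images : List (List (String × String))) (distro : String) (match_depth : Int) : Decidable (Pre_get_catalog_versions images distro match_depth) := by unfold Pre_get_catalog_versions; infer_instance

def pvWitness_get_catalog_versions : (List (List (String × String))) × String × Int :=
  ([[("distro", "debian"), ("version", "12.0.1")], [("distro", "arch")]], "debian", 2)

def Spec_get_catalog_versions (images : List (List (String × String))) (distro : String) (match_depth : Int) (out : List String) : Prop := out = get_catalog_versions_alt images distro match_depth
instance (images : List (List (String × String))) (distro : String) (match_depth : Int) (out : List String) : Decidable (Spec_get_catalog_versions images distro match_depth out) := by unfold Spec_get_catalog_versions; infer_instance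

-- ===== CLAIM (what is proved, stated in full; the proofs are below) =====
def Claim_equal_get_catalog_versions : Prop := ∀ (images : List (List (String × String))) (distro : String) (match_depth : Int), Dom_get_catalog_versions images distro match_depth → Pre_get_catalog_versions images distro match_depth → Spec_get_catalog_versions images distro match_depth (get_catalog_versions images distro match_depth)

-- ===== LEMMAS AND PROOFS =====

-- the list [pre, pre."."r1, pre."."r1."."r2, …] of running prefixes
def prefixJoins : List String → String → List String
  | [], pre => [pre]
  | q :: rest, pre => pre :: prefixJoins rest (pre ++ "." ++ q)

theorem sjoin_cons (p : String) (l : List String) (h : l ≠ []) :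
    PySem.Str.join "." (p :: l) = p ++ "." ++ PySem.Str.join "." l := by
  cases l with
  | nil => exact absurd rfl h
  | cons q rest =>
    apply String.toList_inj.mp
    simp [PySem.Str.join, PySem.Chars.join_cons_cons]

theorem sjoin_single (p : String) : PySem.Str.join "." [p] = p := by
  apply String.toList_inj.mp
  simp [PySem.Str.join, PySem.Chars.join_singleton]

theorem prefixJoins_append (l : List String) : ∀ a b : String,
    prefixJoins l (a ++ b) = (prefixJoins l b).map (a ++ ·) := by
  induction l with
  | nil => intro a b; simp [prefixJoins]
  | cons q rest ih =>
    intro a b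
    simp only [prefixJoins, List.map_cons, List.cons.injEq, true_and]
    rw [show a ++ b ++ "." ++ q = a ++ (b ++ "." ++ q) by
          simp [String.append_assoc], ih]

theorem pyRange_one_succ (n : Nat) :
    PySem.List.pyRange 1 ((n : Int) + 1) = (List.range n).map (fun k : Nat => (k : Int) + 1) := by
  induction n with
  | zero => decide
  | succ m ih =>
    rw [show (((m + 1 : Nat) : Int) + 1) = ((m : Int) + 1) + 1 by push_cast; ring,
        PySem.List.pyRange_one_succ_right (by omega), ih, List.range_succ, List.map_append]
    simp

theorem takeJoins : ∀ (rest : List String) (p : String),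
    (List.range (rest.length + 1)).map
      (fun i => PySem.Str.join "." ((p :: rest).take (i + 1))) = prefixJoins rest p := by
  intro rest
  induction rest with
  | nil => intro p; simp [prefixJoins, sjoin_single]
  | cons q rest ih =>
    intro p
    rw [List.range_succ_eq_map]
    simp only [List.map_cons, List.map_map, List.length_cons, prefixJoins]
    refine List.cons_eq_cons.mpr ⟨by simp [sjoin_single], ?_⟩
    · have hstep : ∀ i : Nat,
          PySem.Str.join "." ((p :: q :: rest).take (Nat.succ i + 1))
            = (p ++ ".") ++ PySem.Str.join "." ((q :: rest).take (i + 1)) := by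
        intro i
        rw [show Nat.succ i + 1 = (i + 1) + 1 by omega, List.take_succ_cons,
            sjoin_cons p _ (by simp), String.append_assoc]
      calc (List.range (rest.length + 1)).map
              ((fun i => PySem.Str.join "." ((p :: q :: rest).take (i + 1))) ∘ Nat.succ)
          = (List.range (rest.length + 1)).map
              (fun i => (p ++ ".") ++ PySem.Str.join "." ((q :: rest).take (i + 1))) := by
            apply List.map_congr_left; intro i _; exact hstep i
        _ = ((List.range (rest.length + 1)).map
              (fun i => PySem.Str.join "." ((q :: rest).take (i + 1)))).map ((p ++ ".") ++ ·) := by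
            rw [List.map_map]; rfl
        _ = (prefixJoins rest q).map ((p ++ ".") ++ ·) := by rw [ih]
        _ = prefixJoins rest ((p ++ ".") ++ q) := (prefixJoins_append rest (p ++ ".") q).symm

theorem A_inner (p : String) (rest : List String) (s : PySem.Set String) :
    (PySem.List.pyRange 1 (((p :: rest).length : Int) + 1)).foldl
      (fun versions depth =>
        PySem.Set.add versions (PySem.Str.join "." (PySem.List.slice (p :: rest) none (some depth))))
      s = (prefixJoins rest p).foldl PySem.Set.add s := by
  rw [List.length_cons, pyRange_one_succ, List.foldl_map, ← takeJoins rest p, List.foldl_map]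
  apply PySem.List.foldl_congr_mem
  intro acc i _
  rw [PySem.List.slice_to _ (by omega), show ((i : Int) + 1).toNat = i + 1 by omega]

theorem B_inner : ∀ (rest : List String) (p : String) (s : PySem.Set String),
    (rest.foldl
      (fun st part => (st.1 ++ "." ++ part, PySem.Set.add st.2 (st.1 ++ "." ++ part)))
      (p, PySem.Set.add s p)).2 = (prefixJoins rest p).foldl PySem.Set.add s := by
  intro rest
  induction rest with
  | nil => intro p s; simp [prefixJoins]
  | cons q rest ih =>
    intro p s
    simp only [List.foldl_cons, prefixJoins, List.foldl_cons]
    exact ih (p ++ "." ++ q) (PySem.Set.add s p)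

theorem splitOn_go_ne_nil (sep : List Char) :
    ∀ (fuel : Nat) (l cur : List Char) (acc : List (List Char)),
      PySem.Chars.splitOn.go sep fuel l cur acc ≠ [] := by
  intro fuel
  induction fuel with
  | zero => intro l cur acc; simp [PySem.Chars.splitOn.go]
  | succ n ih =>
    intro l cur acc
    cases l with
    | nil => simp [PySem.Chars.splitOn.go]
    | cons c rest =>
      rw [PySem.Chars.splitOn.go]
      split
      · exact ih _ _ _
      · exact ih _ _ _

theorem split_getD_ne_nil (v : String) : (PySem.Str.split? v ".").getD [] ≠ [] := by
  simp only [PySem.Str.split?, PySem.Chars.split?]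
  rw [if_neg (by decide)]
  simp only [Option.map_some, Option.getD_some, ne_eq, List.map_eq_nil_iff]
  exact splitOn_go_ne_nil _ _ _ _ _

-- ===== VERDICT (by name: the statement is the Claim_ definition above) =====
theorem get_catalog_versions_spec : Claim_equal_get_catalog_versions := by
  intro images distro match_depth _ hpre
  unfold Spec_get_catalog_versions get_catalog_versions get_catalog_versions_alt
  apply PySem.List.foldl_congr_mem
  intro versions img hmem
  by_cases h : (PySem.Dict.mk img).get? "distro" = some distro
  · simp only [h, if_pos, ne_eq, not_true_eq_false, if_neg, not_false_eq_true]
    obtain ⟨v, hv⟩ := Option.isSome_iff_exists.mp ((hpre img hmem).2.2 h)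
    rw [hv]
    simp only [Option.getD_some]
    rcases hp : (PySem.Str.split? v ".").getD [] with _ | ⟨p, rest⟩
    · exact absurd hp (split_getD_ne_nil v)
    · rw [A_inner]
      exact (B_inner rest p (PySem.Set.add versions v)).symm
  · simp [h]
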